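-- pv_equiv track=rewrite | github.com/duyjimmypham/pepdesign | pepdesign/utils/chemistry.py | has_aggregation_motif
-- ===== SOURCE A (Python) =====
-- HYDROPHOBIC_RESIDUES = set('AVILMFWY')
--
-- def has_aggregation_motif(sequence: str) -> bool:
--     """
--     Detect problematic aggregation motifs.
--
--     Checks for:
--     - Long hydrophobic runs (>= 4 consecutive)
--     - Specific patterns (WWW, FFF, III)
--
--     Args:
--         sequence: Amino acid sequence
--
--     Returns:
--         True if aggregation-prone motifs detected
--     """
--     # Check for long hydrophobic runs
--     hydrophobic_run = 0
--     for aa in sequence: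
--         if aa in HYDROPHOBIC_RESIDUES:
--             hydrophobic_run += 1
--             if hydrophobic_run >= 4:
--                 return True
--         else:
--             hydrophobic_run = 0
--
--     # Check for specific problematic patterns
--     if 'WWW' in sequence or 'FFF' in sequence or 'III' in sequence:
--         return True
--
--     return False
-- ===== SOURCE B (Python) =====
-- HYDROPHOBIC_RESIDUES = set('AVILMFWY')
-- _PATTERNS = ('WWW', 'FFF', 'III')
--
--
-- def has_aggregation_motif(sequence: str) -> bool:
--     n = len(sequence)
--     return any(
--         all(c in HYDROPHOBIC_RESIDUES for c in sequence[i:i + 4])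
--         for i in range(n - 3)
--     ) or any(sequence[i:i + 3] in _PATTERNS for i in range(n - 2))
-- ===== Notes on version B (the rewrite author's own statement) =====
-- stated objective: alternative
-- what changed: Replaces A's stateful run-counter loop plus three substring searches with a single sliding-window scan: any 4-wide window all-hydrophobic, or any 3-wide window equal to WWW/FFF/III.
import Mathlib
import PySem

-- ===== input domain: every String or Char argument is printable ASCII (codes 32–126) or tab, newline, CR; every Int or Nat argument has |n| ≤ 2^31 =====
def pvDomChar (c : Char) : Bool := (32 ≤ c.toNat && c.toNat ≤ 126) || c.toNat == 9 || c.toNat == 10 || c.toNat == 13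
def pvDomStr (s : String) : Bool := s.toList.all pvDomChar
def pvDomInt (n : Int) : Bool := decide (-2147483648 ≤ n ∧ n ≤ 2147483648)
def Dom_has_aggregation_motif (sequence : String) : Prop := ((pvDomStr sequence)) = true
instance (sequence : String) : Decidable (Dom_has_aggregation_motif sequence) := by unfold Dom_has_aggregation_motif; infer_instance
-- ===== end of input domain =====

-- B replaces A's run-counter state machine + substring searches by a sliding-window scan (alternative decomposition, same cost).

-- membership in HYDROPHOBIC_RESIDUES = set('AVILMFWY') (shared constant of the module)
def isHydro (c : Char) : Bool :=
  c == 'A' || c == 'V' || c == 'I' || c == 'L' || c == 'M' || c == 'F' || c == 'W' || c == 'Y'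

-- ===== PORT A =====
-- A's for-loop: run counter, early return True when it reaches 4, reset on non-hydrophobic
def loopA : Nat → List Char → Bool
  | _, [] => false
  | run, a :: t =>
      if isHydro a then
        (if run + 1 ≥ 4 then true else loopA (run + 1) t)
      else loopA 0 t

def has_aggregation_motif (sequence : String) : Bool :=
  if loopA 0 sequence.toList then true
  else
    -- 'WWW' in sequence or 'FFF' in sequence or 'III' in sequence
    PySem.Str.isIn "WWW" sequence || PySem.Str.isIn "FFF" sequence || PySem.Str.isIn "III" sequence

-- ===== PORT B =====
-- any 4-wide window entirely hydrophobic (Source B's first any/all over sequence[i:i+4])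
def win4 : List Char → Bool
  | a :: b :: c :: d :: rest =>
      (isHydro a && isHydro b && isHydro c && isHydro d) || win4 (b :: c :: d :: rest)
  | _ => false

-- any 3-wide window equal to one of the patterns ('WWW','FFF','III')
def win3 : List Char → Bool
  | a :: b :: c :: rest =>
      ((a == 'W' && b == 'W' && c == 'W') || (a == 'F' && b == 'F' && c == 'F') ||
        (a == 'I' && b == 'I' && c == 'I')) || win3 (b :: c :: rest)
  | _ => false

def has_aggregation_motif_alt (sequence : String) : Bool :=
  win4 sequence.toList || win3 sequence.toList

-- ===== PRECONDITION & SPEC =====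
def Spec_has_aggregation_motif (sequence : String) (out : Bool) : Prop := out = has_aggregation_motif_alt sequence
instance (sequence : String) (out : Bool) : Decidable (Spec_has_aggregation_motif sequence out) := by unfold Spec_has_aggregation_motif; infer_instance

-- ===== CLAIM (what is proved, stated in full; the proofs are below) =====
def Claim_equal_has_aggregation_motif : Prop := ∀ (sequence : String), Dom_has_aggregation_motif sequence → Spec_has_aggregation_motif sequence (has_aggregation_motif sequence)

-- ===== LEMMAS AND PROOFS =====

-- the first n characters exist and are hydrophobic
def prefHydro : Nat → List Char → Bool
  | 0, _ => true
  | _ + 1, [] => false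
  | n + 1, a :: t => isHydro a && prefHydro n t

theorem prefHydro_mono {k m : Nat} (h : k ≤ m) (l : List Char)
    (hm : prefHydro m l = true) : prefHydro k l = true := by
  induction k generalizing m l with
  | zero => simp [prefHydro]
  | succ k ih =>
    obtain ⟨m', rfl⟩ : ∃ m', m = m' + 1 := ⟨m - 1, by omega⟩
    cases l with
    | nil => simp [prefHydro] at hm
    | cons a t =>
      simp [prefHydro] at hm ⊢
      exact ⟨hm.1, ih (by omega) t hm.2⟩

theorem win4_cons (a : Char) (t : List Char) :
    win4 (a :: t) = (prefHydro 4 (a :: t) || win4 t) := by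
  match t with
  | [] => simp [win4, prefHydro]
  | [b] => simp [win4, prefHydro]
  | [b, c] => simp [win4, prefHydro]
  | b :: c :: d :: r => simp [win4, prefHydro, Bool.and_assoc]

theorem win4_absorb (t : List Char) : (prefHydro 4 t || win4 t) = win4 t := by
  match t with
  | [] => simp [win4, prefHydro]
  | [a] => simp [win4, prefHydro]
  | [a, b] => simp [win4, prefHydro]
  | [a, b, c] => simp [win4, prefHydro]
  | a :: b :: c :: d :: r =>
    have hp : prefHydro 4 (a :: b :: c :: d :: r) =
        (isHydro a && isHydro b && isHydro c && isHydro d) := by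
      simp [prefHydro, Bool.and_assoc]
    rw [hp, win4]
    cases (isHydro a && isHydro b && isHydro c && isHydro d) <;> simp

theorem loopA_eq (l : List Char) : ∀ run : Nat, run ≤ 3 →
    loopA run l = (prefHydro (4 - run) l || win4 l) := by
  induction l with
  | nil =>
    intro run h
    obtain ⟨m, hm⟩ : ∃ m, 4 - run = m + 1 := ⟨3 - run, by omega⟩
    simp [loopA, win4, hm, prefHydro]
  | cons a t ih =>
    intro run h
    rw [win4_cons]
    by_cases ha : isHydro a = true
    · by_cases h3 : run = 3
      · subst h3
        have hl : loopA 3 (a :: t) = true := by simp [loopA, ha]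
        have h1 : (4 : Nat) - 3 = 1 := rfl
        rw [hl, h1]
        simp [prefHydro, ha]
      · obtain ⟨m, hm⟩ : ∃ m, 4 - run = m + 1 := ⟨3 - run, by omega⟩
        have hstep : loopA run (a :: t) = loopA (run + 1) t := by
          simp [loopA, ha]; omega
        have hmm : 4 - (run + 1) = m := by omega
        rw [hstep, ih (run + 1) (by omega), hmm, hm, prefHydro, ha, Bool.true_and]
        have hp4 : prefHydro 4 (a :: t) = (isHydro a && prefHydro 3 t) := by
          simp [prefHydro]
        rw [hp4, ha, Bool.true_and]
        cases hpm : prefHydro m t with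
        | true => simp
        | false =>
          cases hp3 : prefHydro 3 t with
          | false => simp
          | true =>
            have : prefHydro m t = true := prefHydro_mono (by omega) t hp3
            rw [hpm] at this; cases this
    · have ha' : isHydro a = false := by simpa using ha
      obtain ⟨m, hm⟩ : ∃ m, 4 - run = m + 1 := ⟨3 - run, by omega⟩
      have hstep : loopA run (a :: t) = loopA 0 t := by simp [loopA, ha']
      rw [hstep, ih 0 (by omega), hm, prefHydro, ha', Bool.false_and, Bool.false_or]
      have hp4 : prefHydro 4 (a :: t) = false := by simp [prefHydro, ha']
      rw [hp4, Bool.false_or]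
      exact win4_absorb t

theorem win3_cons (a : Char) (t : List Char) :
    win3 (a :: t) =
      ((match t with
        | b :: c :: _ =>
          ((a == 'W' && b == 'W' && c == 'W') || (a == 'F' && b == 'F' && c == 'F') ||
            (a == 'I' && b == 'I' && c == 'I'))
        | _ => false) || win3 t) := by
  match t with
  | [] => simp [win3]
  | [b] => simp [win3]
  | b :: c :: r => simp [win3]

theorem win3_iff (l : List Char) :
    win3 l = true ↔
      (['W','W','W'] <:+: l ∨ ['F','F','F'] <:+: l ∨ ['I','I','I'] <:+: l) := by
  induction l with
  | nil => simp [win3]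
  | cons a t ih =>
    rw [win3_cons]
    simp only [List.infix_cons_iff, Bool.or_eq_true, ih]
    constructor
    · rintro (hfirst | h)
      · match t with
        | [] => simp at hfirst
        | [b] => simp at hfirst
        | b :: c :: r =>
          simp only [Bool.or_eq_true, Bool.and_eq_true, beq_iff_eq, and_assoc] at hfirst
          rcases hfirst with (h | h) | h
          · obtain ⟨rfl, rfl, rfl⟩ := h
            have hp : (['W','W','W'] : List Char) <+: 'W' :: 'W' :: 'W' :: r := ⟨r, rfl⟩
            tauto
          · obtain ⟨rfl, rfl, rfl⟩ := h
            have hp : (['F','F','F'] : List Char) <+: 'F' :: 'F' :: 'F' :: r := ⟨r, rfl⟩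
            tauto
          · obtain ⟨rfl, rfl, rfl⟩ := h
            have hp : (['I','I','I'] : List Char) <+: 'I' :: 'I' :: 'I' :: r := ⟨r, rfl⟩
            tauto
      · tauto
    · intro h
      have hcase : ∀ (p : Char), ([p,p,p] : List Char) <+: (a :: t) →
          a = p ∧ ∃ r, t = p :: p :: r := by
        intro p hp
        obtain ⟨r', hr⟩ := hp
        have : a = p ∧ t = p :: p :: r' := by
          have := hr.symm
          simpa [List.cons.injEq, and_assoc, eq_comm] using this
        exact ⟨this.1, r', this.2⟩
      rcases h with (hp | hi) | (hp | hi) | (hp | hi)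
      · obtain ⟨rfl, r, rfl⟩ := hcase 'W' hp
        left; simp
      · tauto
      · obtain ⟨rfl, r, rfl⟩ := hcase 'F' hp
        left; simp
      · tauto
      · obtain ⟨rfl, r, rfl⟩ := hcase 'I' hp
        left; simp
      · tauto

theorem substr_eq (s : String) :
    (PySem.Str.isIn "WWW" s || PySem.Str.isIn "FFF" s || PySem.Str.isIn "III" s) =
      win3 s.toList := by
  rw [Bool.eq_iff_iff]
  simp only [Bool.or_eq_true, PySem.Str.isIn_iff_infix, win3_iff]
  constructor <;> intro h <;> · simp only [String.toList] at *; tauto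

-- ===== VERDICT (by name: the statement is the Claim_ definition above) =====
theorem has_aggregation_motif_spec : Claim_equal_has_aggregation_motif := by
  intro s _
  unfold Spec_has_aggregation_motif has_aggregation_motif has_aggregation_motif_alt
  rw [loopA_eq s.toList 0 (by omega), Nat.sub_zero, win4_absorb]
  cases hw : win4 s.toList with
  | true => simp
  | false => simp [← substr_eq s]
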